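-- pv_equiv track=rewrite | github.com/lueasf/aoc | day1/exo2.py | nombre_in
-- ===== SOURCE A (Python) =====
-- dictio = { 'one' : 1, 'two' : 2, 'three' : 3, 'four' : 4, 'five' : 5, 'six' : 6, 'seven' : 7, 'eight' : 8, 'nine' : 9}
--
-- def nombre_in(l):
--     newstr = "" #prochaine ch
--     temp = "" # on regarde ou on en est
--     for c in l:
--         if c.isdigit(): # est ce un nb
--             newstr += c
--             temp = ""
--         else :
--             temp += c #on agrde la ou les cdc
--             for key in dictio: #on regarde si la chaine finit par un nmb str
--                 if temp.endswith(key):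
--                     newstr += str(dictio[key])
--     return(newstr)
-- ===== SOURCE B (Python) =====
-- WORDS_BY_LEN = {
--     3: {'one': '1', 'two': '2', 'six': '6'},
--     4: {'four': '4', 'five': '5', 'nine': '9'},
--     5: {'three': '3', 'seven': '7', 'eight': '8'},
-- }
--
-- def nombre_in(l):
--     out = []
--     for i, c in enumerate(l):
--         if c.isdigit():
--             out.append(c)
--         else:
--             for n, table in WORDS_BY_LEN.items():
--                 if i + 1 >= n:
--                     v = table.get(l[i + 1 - n:i + 1])
--                     if v is not None:
--                         out.append(v)
--     return "".join(out)
-- ===== Notes on version B (the rewrite author's own statement) =====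
-- stated objective: faster
-- what changed: B drops A's growing suffix buffer and its nine per-character endswith tests: it walks positions once and probes three length-grouped hash tables with the fixed-width slice ending at the current position, collecting pieces in a list joined once at the end.
import Mathlib
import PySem

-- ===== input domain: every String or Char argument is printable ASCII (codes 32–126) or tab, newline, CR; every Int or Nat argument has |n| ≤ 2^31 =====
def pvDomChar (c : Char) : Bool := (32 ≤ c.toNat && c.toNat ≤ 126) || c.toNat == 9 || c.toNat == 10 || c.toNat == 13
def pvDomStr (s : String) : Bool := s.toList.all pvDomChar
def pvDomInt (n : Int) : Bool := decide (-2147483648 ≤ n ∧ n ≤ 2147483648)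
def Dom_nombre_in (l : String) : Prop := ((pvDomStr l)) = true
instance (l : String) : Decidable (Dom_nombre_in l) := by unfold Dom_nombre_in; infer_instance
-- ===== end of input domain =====

-- B replaces A's growing suffix buffer and nine endswith tests per character by per-position
-- fixed-width slice lookups in length-grouped hash tables (objective: faster, measured).

-- ===== PORT A =====
-- dictio = {'one': 1, ..., 'nine': 9}  (dict → association list in insertion order)
def pvDictio : List (List Char × Int) :=
  [(['o','n','e'], 1), (['t','w','o'], 2), (['t','h','r','e','e'], 3), (['f','o','u','r'], 4),
   (['f','i','v','e'], 5), (['s','i','x'], 6), (['s','e','v','e','n'], 7),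
   (['e','i','g','h','t'], 8), (['n','i','n','e'], 9)]

def nombre_in (l : String) : String :=
  let r := l.toList.foldl (fun (st : List Char × List Char) c =>
    if PySem.Chars.isdigit c then (st.1 ++ [c], [])
    else
      let temp := st.2 ++ [c]
      (pvDictio.foldl (fun out kv =>
         if PySem.Chars.endswith temp kv.1 then out ++ (PySem.Int.toStr kv.2).toList else out) st.1,
       temp)) ([], [])
  String.ofList r.1

-- ===== PORT B =====
-- WORDS_BY_LEN = {3: {...}, 4: {...}, 5: {...}}
def pvW3 : PySem.Dict (List Char) (List Char) :=
  PySem.Dict.mk [(['o','n','e'], ['1']), (['t','w','o'], ['2']), (['s','i','x'], ['6'])]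
def pvW4 : PySem.Dict (List Char) (List Char) :=
  PySem.Dict.mk [(['f','o','u','r'], ['4']), (['f','i','v','e'], ['5']), (['n','i','n','e'], ['9'])]
def pvW5 : PySem.Dict (List Char) (List Char) :=
  PySem.Dict.mk [(['t','h','r','e','e'], ['3']), (['s','e','v','e','n'], ['7']), (['e','i','g','h','t'], ['8'])]

def pvWordsByLen : List (Int × PySem.Dict (List Char) (List Char)) := [(3, pvW3), (4, pvW4), (5, pvW5)]

def nombre_in_alt (l : String) : String :=
  let s := l.toList
  let out := (PySem.List.enumerate s 0).foldl (fun out ic =>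
    if PySem.Chars.isdigit ic.2 then out ++ [ic.2]
    else
      pvWordsByLen.foldl (fun out nt =>
        if nt.1 ≤ ic.1 + 1 then
          match nt.2.get? (PySem.List.slice s (some (ic.1 + 1 - nt.1)) (some (ic.1 + 1))) with
          | some v => out ++ v
          | none => out
        else out) out) []
  String.ofList out

-- ===== PRECONDITION & SPEC =====
def Spec_nombre_in (l : String) (out : String) : Prop := out = nombre_in_alt l
instance (l : String) (out : String) : Decidable (Spec_nombre_in l out) := by unfold Spec_nombre_in; infer_instance

-- ===== CLAIM (what is proved, stated in full; the proofs are below) =====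
def Claim_equal_nombre_in : Prop := ∀ (l : String), Dom_nombre_in l → Spec_nombre_in l (nombre_in l)

-- ===== LEMMAS AND PROOFS =====

-- The per-character emission of A's inner loop, started from the empty accumulator.
def pvEmitA (t : List Char) : List Char :=
  pvDictio.foldl (fun out kv =>
    if PySem.Chars.endswith t kv.1 then out ++ (PySem.Int.toStr kv.2).toList else out) []

-- A's whole loop as a recursion producing only the emitted characters (t = current buffer).
def pvRunA : List Char → List Char → List Char
  | [], _ => []
  | c :: cs, t =>
    if PySem.Chars.isdigit c then c :: pvRunA cs []
    else pvEmitA (t ++ [c]) ++ pvRunA cs (t ++ [c])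

-- One table probe of B, phrased on the processed prefix q (current char = last of q).
def pvTry (q : List Char) (n : Nat) (tbl : PySem.Dict (List Char) (List Char)) : List Char :=
  if n ≤ q.length then
    match tbl.get? (q.drop (q.length - n)) with
    | some v => v
    | none => []
  else []

def pvEmitB (q : List Char) : List Char := pvTry q 3 pvW3 ++ pvTry q 4 pvW4 ++ pvTry q 5 pvW5

-- B's whole loop as a recursion over the remaining characters, carrying the processed prefix p.
def pvRunB : List Char → List Char → List Char
  | [], _ => []
  | c :: cs, p => (if PySem.Chars.isdigit c then [c] else pvEmitB (p ++ [c])) ++ pvRunB cs (p ++ [c])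

-- A's buffer after processing p.
def pvLastRun (p : List Char) : List Char :=
  p.foldl (fun r c => if PySem.Chars.isdigit c then [] else r ++ [c]) []

-- generic: a foldl whose step satisfies step (a ++ b) x = a ++ step b x factors its accumulator
theorem pvFoldlShift {α β : Type} (step : List β → α → List β)
    (h : ∀ (a b : List β) (x : α), step (a ++ b) x = a ++ step b x) :
    ∀ (L : List α) (a b : List β), L.foldl step (a ++ b) = a ++ L.foldl step b := by
  intro L
  induction L with
  | nil => intro a b; simp
  | cons x xs ih => intro a b; simp only [List.foldl_cons, h]; exact ih a (step b x)

theorem pvFoldlShift0 {α β : Type} (step : List β → α → List β)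
    (h : ∀ (a b : List β) (x : α), step (a ++ b) x = a ++ step b x)
    (L : List α) (a : List β) : L.foldl step a = a ++ L.foldl step [] := by
  have := pvFoldlShift step h L a []
  simpa using this

theorem pvInnerA_shift (t : List Char) (o : List Char) :
    pvDictio.foldl (fun out kv =>
      if PySem.Chars.endswith t kv.1 then out ++ (PySem.Int.toStr kv.2).toList else out) o
    = o ++ pvEmitA t := by
  unfold pvEmitA
  apply pvFoldlShift0
  intro a b kv
  by_cases h : PySem.Chars.endswith t kv.1 <;> simp [h]

def pvStepA (st : List Char × List Char) (c : Char) : List Char × List Char :=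
  if PySem.Chars.isdigit c then (st.1 ++ [c], [])
  else
    let temp := st.2 ++ [c]
    (pvDictio.foldl (fun out kv =>
       if PySem.Chars.endswith temp kv.1 then out ++ (PySem.Int.toStr kv.2).toList else out) st.1,
     temp)

theorem pvFoldA_eq (cs : List Char) : ∀ (o t : List Char),
    (cs.foldl pvStepA (o, t)).1 = o ++ pvRunA cs t := by
  induction cs with
  | nil => intro o t; simp [pvRunA]
  | cons c cs ih =>
    intro o t
    rw [List.foldl_cons]
    by_cases h : PySem.Chars.isdigit c
    · have hstep : pvStepA (o, t) c = (o ++ [c], []) := by simp [pvStepA, h]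
      rw [hstep, ih]
      simp [pvRunA, h]
    · have hstep : pvStepA (o, t) c = (o ++ pvEmitA (t ++ [c]), t ++ [c]) := by
        simp only [pvStepA, if_neg h]
        rw [pvInnerA_shift]
      rw [hstep, ih]
      simp [pvRunA, h]

theorem pvA_eq (l : String) : nombre_in l = String.ofList (pvRunA l.toList []) := by
  have h : nombre_in l
      = String.ofList ((l.toList.foldl pvStepA (([] : List Char), ([] : List Char))).1) := rfl
  rw [h, pvFoldA_eq]
  simp

-- slicing the last n characters of the processed prefix
theorem pvSliceLast (s q r : List Char) (hs : q ++ r = s) (n : Nat) (hn : n ≤ q.length) :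
    PySem.List.slice s (some ((q.length : Int) - (n : Int))) (some ((q.length : Int)))
      = q.drop (q.length - n) := by
  have h1 : ((q.length : Int) - (n : Int)) = (((q.length - n : Nat)) : Int) := by
    push_cast [Nat.cast_sub hn]; ring
  rw [h1, PySem.List.slice_natCast]
  rw [show q.length - (q.length - n) = n from by omega]
  subst hs
  rw [List.drop_append_of_le_length (by omega)]
  exact List.take_left' (by simp [List.length_drop]; omega)

theorem pvEntry_eq (s p r : List Char) (c : Char) (hs : p ++ c :: r = s)
    (n : Nat) (tbl : PySem.Dict (List Char) (List Char)) (o : List Char) :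
    (if ((n : Int)) ≤ (p.length : Int) + 1 then
       match tbl.get? (PySem.List.slice s (some ((p.length : Int) + 1 - (n : Int))) (some ((p.length : Int) + 1))) with
       | some v => o ++ v
       | none => o
     else o) = o ++ pvTry (p ++ [c]) n tbl := by
  have hq : (p ++ [c]) ++ r = s := by simpa using hs
  have hlen : (p ++ [c]).length = p.length + 1 := by simp
  by_cases hn : n ≤ (p ++ [c]).length
  · have hc : ((n : Int)) ≤ (p.length : Int) + 1 := by
      rw [hlen] at hn; exact_mod_cast hn
    rw [if_pos hc]
    have hb : ((p.length : Int) + 1) = (((p ++ [c]).length : Nat) : Int) := by simp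
    have ha : ((p.length : Int) + 1 - (n : Int)) = (((p ++ [c]).length : Nat) : Int) - (n : Int) := by simp
    rw [ha, hb, pvSliceLast s (p ++ [c]) r hq n hn]
    unfold pvTry
    rw [if_pos hn]
    cases tbl.get? ((p ++ [c]).drop ((p ++ [c]).length - n)) <;> simp
  · have hc : ¬ ((n : Int)) ≤ (p.length : Int) + 1 := by
      rw [hlen] at hn; intro h; exact hn (by exact_mod_cast h)
    rw [if_neg hc]
    unfold pvTry
    rw [if_neg hn]
    simp

theorem pvInnerB_eq (s p r : List Char) (c : Char) (hs : p ++ c :: r = s) (o : List Char) :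
    pvWordsByLen.foldl (fun out nt =>
      if nt.1 ≤ (p.length : Int) + 1 then
        match nt.2.get? (PySem.List.slice s (some ((p.length : Int) + 1 - nt.1)) (some ((p.length : Int) + 1))) with
        | some v => out ++ v
        | none => out
      else out) o
    = o ++ pvEmitB (p ++ [c]) := by
  have e3 := pvEntry_eq s p r c hs 3 pvW3 o
  have e4 := pvEntry_eq s p r c hs 4 pvW4 (o ++ pvTry (p ++ [c]) 3 pvW3)
  have e5 := pvEntry_eq s p r c hs 5 pvW5 ((o ++ pvTry (p ++ [c]) 3 pvW3) ++ pvTry (p ++ [c]) 4 pvW4)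
  push_cast at e3 e4 e5
  simp only [pvWordsByLen, List.foldl_cons, List.foldl_nil]
  rw [e3, e4, e5]
  simp [pvEmitB]

def pvStepB (s : List Char) (out : List Char) (ic : Int × Char) : List Char :=
  if PySem.Chars.isdigit ic.2 then out ++ [ic.2]
  else
    pvWordsByLen.foldl (fun out nt =>
      if nt.1 ≤ ic.1 + 1 then
        match nt.2.get? (PySem.List.slice s (some (ic.1 + 1 - nt.1)) (some (ic.1 + 1))) with
        | some v => out ++ v
        | none => out
      else out) out

theorem pvFoldB_eq (s : List Char) : ∀ (cs p o : List Char), p ++ cs = s →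
    ((PySem.List.enumerate cs (p.length : Int)).foldl (pvStepB s) o) = o ++ pvRunB cs p := by
  intro cs
  induction cs with
  | nil => intro p o _; simp [PySem.List.enumerate_nil, pvRunB]
  | cons c cs ih =>
    intro p o hs
    rw [PySem.List.enumerate_cons, List.foldl_cons]
    have hlen : ((p.length : Int) + 1) = (((p ++ [c]).length : Nat) : Int) := by simp
    have hs' : (p ++ [c]) ++ cs = s := by simpa using hs
    by_cases h : PySem.Chars.isdigit c
    · have hstep : pvStepB s o ((p.length : Int), c) = o ++ [c] := by simp [pvStepB, h]
      rw [hstep, hlen, ih (p ++ [c]) (o ++ [c]) hs']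
      simp [pvRunB, h]
    · have hstep : pvStepB s o ((p.length : Int), c) = o ++ pvEmitB (p ++ [c]) := by
        simp only [pvStepB, if_neg h]
        exact pvInnerB_eq s p cs c hs o
      rw [hstep, hlen, ih (p ++ [c]) (o ++ pvEmitB (p ++ [c])) hs']
      simp [pvRunB, h]

theorem pvB_eq (l : String) : nombre_in_alt l = String.ofList (pvRunB l.toList []) := by
  have h : nombre_in_alt l
      = String.ofList ((PySem.List.enumerate l.toList ((([] : List Char).length : Nat) : Int)).foldl
          (pvStepB l.toList) []) := rfl
  rw [h, pvFoldB_eq l.toList l.toList [] [] (by simp)]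
  simp

-- ===== the pointwise emission equality =====

theorem pvLastRun_append (p : List Char) (c : Char) :
    pvLastRun (p ++ [c]) = if PySem.Chars.isdigit c then [] else pvLastRun p ++ [c] := by
  unfold pvLastRun
  rw [List.foldl_append]
  simp

theorem pvLastRun_eq (q : List Char) :
    pvLastRun q = (q.reverse.takeWhile (fun c => !PySem.Chars.isdigit c)).reverse := by
  induction q using List.reverseRecOn with
  | nil => simp [pvLastRun]
  | append_singleton p c ih =>
    rw [pvLastRun_append, ih]
    by_cases h : PySem.Chars.isdigit c <;> simp [h]

theorem pvLastRun_suffix (q : List Char) : pvLastRun q <:+ q := by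
  rw [pvLastRun_eq]
  have := List.takeWhile_prefix (l := q.reverse) (fun c => !PySem.Chars.isdigit c)
  have h2 : (q.reverse.takeWhile (fun c => !PySem.Chars.isdigit c)).reverse <:+ q.reverse.reverse :=
    List.reverse_suffix.mpr this
  simpa using h2

theorem pvSuffix_lastRun (q w : List Char) (hw : ∀ c ∈ w, PySem.Chars.isdigit c = false)
    (h : w <:+ q) : w <:+ pvLastRun q := by
  obtain ⟨u, hu⟩ := h
  rw [pvLastRun_eq, ← hu]
  rw [List.reverse_append]
  rw [List.takeWhile_append_of_pos (by intro c hc; simp [hw c (by simpa using hc)])]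
  rw [List.reverse_append, List.reverse_reverse]
  exact List.suffix_append _ _

theorem pvEndswith_lastRun (q w : List Char) (hw : ∀ c ∈ w, PySem.Chars.isdigit c = false) :
    PySem.Chars.endswith (pvLastRun q) w = PySem.Chars.endswith q w := by
  by_cases h : w <:+ q
  · rw [(PySem.Chars.endswith_iff q w).mpr h,
        (PySem.Chars.endswith_iff (pvLastRun q) w).mpr (pvSuffix_lastRun q w hw h)]
  · have h1 : PySem.Chars.endswith q w = false := by
      cases ht : PySem.Chars.endswith q w
      · rfl
      · exact absurd ((PySem.Chars.endswith_iff q w).mp ht) h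
    have h2 : PySem.Chars.endswith (pvLastRun q) w = false := by
      cases ht : PySem.Chars.endswith (pvLastRun q) w
      · rfl
      · exact absurd (((PySem.Chars.endswith_iff _ w).mp ht).trans (pvLastRun_suffix q)) h
    rw [h1, h2]

-- two suffixes of the same list: the shorter is a suffix of the longer
theorem pvSuffix_of_suffix (q w1 w2 : List Char) (h1 : w1 <:+ q) (h2 : w2 <:+ q)
    (hl : w1.length ≤ w2.length) : w1 <:+ w2 := by
  have p1 : w1.reverse <+: q.reverse := List.reverse_prefix.mpr h1
  have p2 : w2.reverse <+: q.reverse := List.reverse_prefix.mpr h2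
  exact List.reverse_prefix.mp (List.prefix_of_prefix_length_le p1 p2 (by simpa using hl))

theorem pvEndswith_short (q w : List Char) (h : q.length < w.length) :
    PySem.Chars.endswith q w = false := by
  cases ht : PySem.Chars.endswith q w
  · rfl
  · have := ((PySem.Chars.endswith_iff q w).mp ht).length_le
    omega

theorem pvNotOther (q w1 w2 : List Char) (h : PySem.Chars.endswith q w1 = true)
    (hne1 : ¬ w1 <:+ w2) (hne2 : ¬ w2 <:+ w1) : PySem.Chars.endswith q w2 = false := by
  cases ht : PySem.Chars.endswith q w2
  · rfl
  · exfalso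
    have s1 := (PySem.Chars.endswith_iff q w1).mp h
    have s2 := (PySem.Chars.endswith_iff q w2).mp ht
    rcases le_total w1.length w2.length with hl | hl
    · exact hne1 (pvSuffix_of_suffix q w1 w2 s1 s2 hl)
    · exact hne2 (pvSuffix_of_suffix q w2 w1 s2 s1 hl)

theorem pvBeq_endswith (q w : List Char) (n : Nat) (hw : w.length = n) :
    (w == q.drop (q.length - n)) = PySem.Chars.endswith q w := by
  subst hw
  by_cases hs : w <:+ q
  · rw [(PySem.Chars.endswith_iff q w).mpr hs]
    have h2 := List.suffix_iff_eq_drop.mp hs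
    rw [← h2]
    simp
  · have h1 : PySem.Chars.endswith q w = false := by
      cases hb : PySem.Chars.endswith q w
      · rfl
      · exact absurd ((PySem.Chars.endswith_iff q w).mp hb) hs
    rw [h1]
    simp only [beq_eq_false_iff_ne, ne_eq]
    intro he
    exact hs (List.suffix_iff_eq_drop.mpr he)

theorem pvStepA_shift (t : List Char) (a b : List Char) (kv : List Char × Int) :
    (if PySem.Chars.endswith t kv.1 then (a ++ b) ++ (PySem.Int.toStr kv.2).toList else a ++ b)
    = a ++ (if PySem.Chars.endswith t kv.1 then b ++ (PySem.Int.toStr kv.2).toList else b) := by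
  by_cases h : PySem.Chars.endswith t kv.1 <;> simp [h]

theorem pvEmitA_cons (t : List Char) (kv : List Char × Int) (rest : List (List Char × Int)) :
    (kv :: rest).foldl (fun out kv =>
      if PySem.Chars.endswith t kv.1 then out ++ (PySem.Int.toStr kv.2).toList else out) []
    = (if PySem.Chars.endswith t kv.1 then (PySem.Int.toStr kv.2).toList else [])
      ++ rest.foldl (fun out kv =>
        if PySem.Chars.endswith t kv.1 then out ++ (PySem.Int.toStr kv.2).toList else out) [] := by
  rw [List.foldl_cons]
  rw [pvFoldlShift0 _ (fun a b x => pvStepA_shift t a b x) rest]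
  by_cases h : PySem.Chars.endswith t kv.1 <;> simp [h]


theorem pvTry_mk3 (q : List Char) (n : Nat) (w1 w2 w3 v1 v2 v3 : List Char)
    (h1 : w1.length = n) (h2 : w2.length = n) (h3 : w3.length = n) :
    pvTry q n (PySem.Dict.mk [(w1, v1), (w2, v2), (w3, v3)]) =
      (if PySem.Chars.endswith q w1 then v1
       else if PySem.Chars.endswith q w2 then v2
       else if PySem.Chars.endswith q w3 then v3 else []) := by
  unfold pvTry
  by_cases hq : n ≤ q.length
  · rw [if_pos hq]
    simp only [PySem.Dict.get?_mk_cons]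
    rw [pvBeq_endswith q w1 n h1, pvBeq_endswith q w2 n h2, pvBeq_endswith q w3 n h3]
    by_cases b1 : PySem.Chars.endswith q w1 <;> by_cases b2 : PySem.Chars.endswith q w2 <;>
      by_cases b3 : PySem.Chars.endswith q w3 <;>
      simp [b1, b2, b3, PySem.Dict.get?]
  · rw [if_neg hq]
    have f1 := pvEndswith_short q w1 (by omega)
    have f2 := pvEndswith_short q w2 (by omega)
    have f3 := pvEndswith_short q w3 (by omega)
    simp [f1, f2, f3]

set_option maxRecDepth 8000 in
theorem pvCore (q : List Char) : pvEmitA (pvLastRun q) = pvEmitB q := by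
  have hE : pvEmitA (pvLastRun q) = pvEmitA q := by
    unfold pvEmitA pvDictio
    simp only [pvEmitA_cons, List.foldl_nil]
    rw [pvEndswith_lastRun q ['o','n','e'] (by intro c hc; fin_cases hc <;> rfl), pvEndswith_lastRun q ['t','w','o'] (by intro c hc; fin_cases hc <;> rfl), pvEndswith_lastRun q ['t','h','r','e','e'] (by intro c hc; fin_cases hc <;> rfl), pvEndswith_lastRun q ['f','o','u','r'] (by intro c hc; fin_cases hc <;> rfl), pvEndswith_lastRun q ['f','i','v','e'] (by intro c hc; fin_cases hc <;> rfl), pvEndswith_lastRun q ['s','i','x'] (by intro c hc; fin_cases hc <;> rfl), pvEndswith_lastRun q ['s','e','v','e','n'] (by intro c hc; fin_cases hc <;> rfl), pvEndswith_lastRun q ['e','i','g','h','t'] (by intro c hc; fin_cases hc <;> rfl), pvEndswith_lastRun q ['n','i','n','e'] (by intro c hc; fin_cases hc <;> rfl)]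
  rw [hE]
  unfold pvEmitA pvDictio pvEmitB pvW3 pvW4 pvW5
  simp only [pvEmitA_cons, List.foldl_nil]
  rw [pvTry_mk3 q 3 _ _ _ _ _ _ (by rfl) (by rfl) (by rfl),
      pvTry_mk3 q 4 _ _ _ _ _ _ (by rfl) (by rfl) (by rfl),
      pvTry_mk3 q 5 _ _ _ _ _ _ (by rfl) (by rfl) (by rfl)]
  by_cases h1 : PySem.Chars.endswith q ['o','n','e']
  case pos =>
    have f2 := pvNotOther q ['o','n','e'] ['t','w','o'] h1 (by decide) (by decide)
    have f3 := pvNotOther q ['o','n','e'] ['t','h','r','e','e'] h1 (by decide) (by decide)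
    have f4 := pvNotOther q ['o','n','e'] ['f','o','u','r'] h1 (by decide) (by decide)
    have f5 := pvNotOther q ['o','n','e'] ['f','i','v','e'] h1 (by decide) (by decide)
    have f6 := pvNotOther q ['o','n','e'] ['s','i','x'] h1 (by decide) (by decide)
    have f7 := pvNotOther q ['o','n','e'] ['s','e','v','e','n'] h1 (by decide) (by decide)
    have f8 := pvNotOther q ['o','n','e'] ['e','i','g','h','t'] h1 (by decide) (by decide)
    have f9 := pvNotOther q ['o','n','e'] ['n','i','n','e'] h1 (by decide) (by decide)
    simp [h1, f2, f3, f4, f5, f6, f7, f8, f9] <;> decide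
  case neg =>
  by_cases h2 : PySem.Chars.endswith q ['t','w','o']
  case pos =>
    have f1 := pvNotOther q ['t','w','o'] ['o','n','e'] h2 (by decide) (by decide)
    have f3 := pvNotOther q ['t','w','o'] ['t','h','r','e','e'] h2 (by decide) (by decide)
    have f4 := pvNotOther q ['t','w','o'] ['f','o','u','r'] h2 (by decide) (by decide)
    have f5 := pvNotOther q ['t','w','o'] ['f','i','v','e'] h2 (by decide) (by decide)
    have f6 := pvNotOther q ['t','w','o'] ['s','i','x'] h2 (by decide) (by decide)
    have f7 := pvNotOther q ['t','w','o'] ['s','e','v','e','n'] h2 (by decide) (by decide)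
    have f8 := pvNotOther q ['t','w','o'] ['e','i','g','h','t'] h2 (by decide) (by decide)
    have f9 := pvNotOther q ['t','w','o'] ['n','i','n','e'] h2 (by decide) (by decide)
    simp [h2, f1, f3, f4, f5, f6, f7, f8, f9] <;> decide
  case neg =>
  by_cases h3 : PySem.Chars.endswith q ['t','h','r','e','e']
  case pos =>
    have f1 := pvNotOther q ['t','h','r','e','e'] ['o','n','e'] h3 (by decide) (by decide)
    have f2 := pvNotOther q ['t','h','r','e','e'] ['t','w','o'] h3 (by decide) (by decide)
    have f4 := pvNotOther q ['t','h','r','e','e'] ['f','o','u','r'] h3 (by decide) (by decide)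
    have f5 := pvNotOther q ['t','h','r','e','e'] ['f','i','v','e'] h3 (by decide) (by decide)
    have f6 := pvNotOther q ['t','h','r','e','e'] ['s','i','x'] h3 (by decide) (by decide)
    have f7 := pvNotOther q ['t','h','r','e','e'] ['s','e','v','e','n'] h3 (by decide) (by decide)
    have f8 := pvNotOther q ['t','h','r','e','e'] ['e','i','g','h','t'] h3 (by decide) (by decide)
    have f9 := pvNotOther q ['t','h','r','e','e'] ['n','i','n','e'] h3 (by decide) (by decide)
    simp [h3, f1, f2, f4, f5, f6, f7, f8, f9] <;> decide
  case neg =>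
  by_cases h4 : PySem.Chars.endswith q ['f','o','u','r']
  case pos =>
    have f1 := pvNotOther q ['f','o','u','r'] ['o','n','e'] h4 (by decide) (by decide)
    have f2 := pvNotOther q ['f','o','u','r'] ['t','w','o'] h4 (by decide) (by decide)
    have f3 := pvNotOther q ['f','o','u','r'] ['t','h','r','e','e'] h4 (by decide) (by decide)
    have f5 := pvNotOther q ['f','o','u','r'] ['f','i','v','e'] h4 (by decide) (by decide)
    have f6 := pvNotOther q ['f','o','u','r'] ['s','i','x'] h4 (by decide) (by decide)
    have f7 := pvNotOther q ['f','o','u','r'] ['s','e','v','e','n'] h4 (by decide) (by decide)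
    have f8 := pvNotOther q ['f','o','u','r'] ['e','i','g','h','t'] h4 (by decide) (by decide)
    have f9 := pvNotOther q ['f','o','u','r'] ['n','i','n','e'] h4 (by decide) (by decide)
    simp [h4, f1, f2, f3, f5, f6, f7, f8, f9] <;> decide
  case neg =>
  by_cases h5 : PySem.Chars.endswith q ['f','i','v','e']
  case pos =>
    have f1 := pvNotOther q ['f','i','v','e'] ['o','n','e'] h5 (by decide) (by decide)
    have f2 := pvNotOther q ['f','i','v','e'] ['t','w','o'] h5 (by decide) (by decide)
    have f3 := pvNotOther q ['f','i','v','e'] ['t','h','r','e','e'] h5 (by decide) (by decide)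
    have f4 := pvNotOther q ['f','i','v','e'] ['f','o','u','r'] h5 (by decide) (by decide)
    have f6 := pvNotOther q ['f','i','v','e'] ['s','i','x'] h5 (by decide) (by decide)
    have f7 := pvNotOther q ['f','i','v','e'] ['s','e','v','e','n'] h5 (by decide) (by decide)
    have f8 := pvNotOther q ['f','i','v','e'] ['e','i','g','h','t'] h5 (by decide) (by decide)
    have f9 := pvNotOther q ['f','i','v','e'] ['n','i','n','e'] h5 (by decide) (by decide)
    simp [h5, f1, f2, f3, f4, f6, f7, f8, f9] <;> decide
  case neg =>
  by_cases h6 : PySem.Chars.endswith q ['s','i','x']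
  case pos =>
    have f1 := pvNotOther q ['s','i','x'] ['o','n','e'] h6 (by decide) (by decide)
    have f2 := pvNotOther q ['s','i','x'] ['t','w','o'] h6 (by decide) (by decide)
    have f3 := pvNotOther q ['s','i','x'] ['t','h','r','e','e'] h6 (by decide) (by decide)
    have f4 := pvNotOther q ['s','i','x'] ['f','o','u','r'] h6 (by decide) (by decide)
    have f5 := pvNotOther q ['s','i','x'] ['f','i','v','e'] h6 (by decide) (by decide)
    have f7 := pvNotOther q ['s','i','x'] ['s','e','v','e','n'] h6 (by decide) (by decide)
    have f8 := pvNotOther q ['s','i','x'] ['e','i','g','h','t'] h6 (by decide) (by decide)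
    have f9 := pvNotOther q ['s','i','x'] ['n','i','n','e'] h6 (by decide) (by decide)
    simp [h6, f1, f2, f3, f4, f5, f7, f8, f9] <;> decide
  case neg =>
  by_cases h7 : PySem.Chars.endswith q ['s','e','v','e','n']
  case pos =>
    have f1 := pvNotOther q ['s','e','v','e','n'] ['o','n','e'] h7 (by decide) (by decide)
    have f2 := pvNotOther q ['s','e','v','e','n'] ['t','w','o'] h7 (by decide) (by decide)
    have f3 := pvNotOther q ['s','e','v','e','n'] ['t','h','r','e','e'] h7 (by decide) (by decide)
    have f4 := pvNotOther q ['s','e','v','e','n'] ['f','o','u','r'] h7 (by decide) (by decide)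
    have f5 := pvNotOther q ['s','e','v','e','n'] ['f','i','v','e'] h7 (by decide) (by decide)
    have f6 := pvNotOther q ['s','e','v','e','n'] ['s','i','x'] h7 (by decide) (by decide)
    have f8 := pvNotOther q ['s','e','v','e','n'] ['e','i','g','h','t'] h7 (by decide) (by decide)
    have f9 := pvNotOther q ['s','e','v','e','n'] ['n','i','n','e'] h7 (by decide) (by decide)
    simp [h7, f1, f2, f3, f4, f5, f6, f8, f9] <;> decide
  case neg =>
  by_cases h8 : PySem.Chars.endswith q ['e','i','g','h','t']
  case pos =>
    have f1 := pvNotOther q ['e','i','g','h','t'] ['o','n','e'] h8 (by decide) (by decide)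
    have f2 := pvNotOther q ['e','i','g','h','t'] ['t','w','o'] h8 (by decide) (by decide)
    have f3 := pvNotOther q ['e','i','g','h','t'] ['t','h','r','e','e'] h8 (by decide) (by decide)
    have f4 := pvNotOther q ['e','i','g','h','t'] ['f','o','u','r'] h8 (by decide) (by decide)
    have f5 := pvNotOther q ['e','i','g','h','t'] ['f','i','v','e'] h8 (by decide) (by decide)
    have f6 := pvNotOther q ['e','i','g','h','t'] ['s','i','x'] h8 (by decide) (by decide)
    have f7 := pvNotOther q ['e','i','g','h','t'] ['s','e','v','e','n'] h8 (by decide) (by decide)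
    have f9 := pvNotOther q ['e','i','g','h','t'] ['n','i','n','e'] h8 (by decide) (by decide)
    simp [h8, f1, f2, f3, f4, f5, f6, f7, f9] <;> decide
  case neg =>
  by_cases h9 : PySem.Chars.endswith q ['n','i','n','e']
  case pos =>
    have f1 := pvNotOther q ['n','i','n','e'] ['o','n','e'] h9 (by decide) (by decide)
    have f2 := pvNotOther q ['n','i','n','e'] ['t','w','o'] h9 (by decide) (by decide)
    have f3 := pvNotOther q ['n','i','n','e'] ['t','h','r','e','e'] h9 (by decide) (by decide)
    have f4 := pvNotOther q ['n','i','n','e'] ['f','o','u','r'] h9 (by decide) (by decide)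
    have f5 := pvNotOther q ['n','i','n','e'] ['f','i','v','e'] h9 (by decide) (by decide)
    have f6 := pvNotOther q ['n','i','n','e'] ['s','i','x'] h9 (by decide) (by decide)
    have f7 := pvNotOther q ['n','i','n','e'] ['s','e','v','e','n'] h9 (by decide) (by decide)
    have f8 := pvNotOther q ['n','i','n','e'] ['e','i','g','h','t'] h9 (by decide) (by decide)
    simp [h9, f1, f2, f3, f4, f5, f6, f7, f8] <;> decide
  case neg =>
  simp [h1, h2, h3, h4, h5, h6, h7, h8, h9]

theorem pvRun_eq (cs : List Char) : ∀ (p : List Char), pvRunA cs (pvLastRun p) = pvRunB cs p := by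
  induction cs with
  | nil => intro p; rfl
  | cons c cs ih =>
    intro p
    by_cases h : PySem.Chars.isdigit c
    · have hl : pvLastRun (p ++ [c]) = [] := by rw [pvLastRun_append]; simp [h]
      have h2 := ih (p ++ [c])
      rw [hl] at h2
      simp only [pvRunA, pvRunB, if_pos h, h2]
      simp
    · have hl : pvLastRun (p ++ [c]) = pvLastRun p ++ [c] := by rw [pvLastRun_append]; simp [h]
      have h2 := ih (p ++ [c])
      rw [hl] at h2
      simp only [pvRunA, pvRunB, if_neg h]
      rw [← hl, pvCore (p ++ [c]), hl, h2]

theorem pvMain (l : String) : nombre_in l = nombre_in_alt l := by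
  have h1 := pvRun_eq l.toList []
  rw [show pvLastRun [] = ([] : List Char) from rfl] at h1
  rw [pvA_eq, pvB_eq, h1]

-- ===== VERDICT (by name: the statement is the Claim_ definition above) =====
theorem nombre_in_spec : Claim_equal_nombre_in := by
  intro l _
  unfold Spec_nombre_in
  exact pvMain l
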